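-- pv_equiv track=rewrite | github.com/joaow0/Simple_Sentence_Analyzer | Simple_Sentence_Analyzer.py | text_analyzer
-- ===== SOURCE A (Python) =====
-- def text_analyzer(sentence):
--     count = 0
--     for char in sentence:
--         if char in 'aA':
--             count += 1
--     words = sentence.split()
--     longest = sorted(words, key=len, reverse=True)
--     total_words = len(words)
--     return (
--         f'The sentence has {total_words} words',
--         f'The letter a/A appears {count} times',
--         f'The 5 longest words are {longest[0:5]}'
--     )
-- ===== SOURCE B (Python) =====
-- def text_analyzer(sentence):
--     count = sentence.count('a') + sentence.count('A')
--     words = sentence.split()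
--     best = []
--     for w in words:
--         i = 0
--         while i < len(best) and len(best[i]) >= len(w):
--             i += 1
--         best.insert(i, w)
--         del best[5:]
--     total_words = len(words)
--     return (
--         f'The sentence has {total_words} words',
--         f'The letter a/A appears {count} times',
--         f'The 5 longest words are {best}'
--     )
-- ===== Notes on version B (the rewrite author's own statement) =====
-- stated objective: faster
-- what changed: Replaces the full stable descending sort of all words plus slicing with a single pass that maintains only the current top-5 longest words via bounded insertion, and obtains the letter count with two str.count calls instead of a per-character loop.
import Mathlib
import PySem

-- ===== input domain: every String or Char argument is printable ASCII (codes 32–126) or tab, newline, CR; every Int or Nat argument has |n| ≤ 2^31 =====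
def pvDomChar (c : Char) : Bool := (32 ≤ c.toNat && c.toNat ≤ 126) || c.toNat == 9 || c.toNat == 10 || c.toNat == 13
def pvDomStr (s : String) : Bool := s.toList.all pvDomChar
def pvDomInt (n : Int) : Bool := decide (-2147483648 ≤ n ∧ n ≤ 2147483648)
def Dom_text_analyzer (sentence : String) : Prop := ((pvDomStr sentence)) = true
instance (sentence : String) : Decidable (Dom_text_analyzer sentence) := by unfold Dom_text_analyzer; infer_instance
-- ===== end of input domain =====

-- B replaces the full descending sort + slice with a one-pass bounded top-5 insertion and counts 'a'/'A' with str.count; equal return value on all inputs.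


-- ===== PORT A =====
-- shared formatting helpers: Python's repr of a str (exact for the printable-ASCII,
-- whitespace-free words split() produces: only backslash and the quote need escaping)
def pyReprStr (w : List Char) : List Char :=
  if '\'' ∈ w ∧ '"' ∉ w then
    '"' :: (w.flatMap (fun c => if c = '\\' then ['\\', '\\'] else [c])) ++ ['"']
  else
    '\'' :: (w.flatMap (fun c => if c = '\\' then ['\\', '\\']
                                 else if c = '\'' then ['\\', '\'']
                                 else [c])) ++ ['\'']

-- Python's repr of a list of str
def pyReprStrList (ws : List (List Char)) : List Char :=
  '[' :: PySem.Chars.join [',', ' '] (ws.map pyReprStr) ++ [']']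

def fmtWords (n : Nat) : List Char :=
  "The sentence has ".toList ++ PySem.Int.toChars (n : Int) ++ " words".toList
def fmtCount (n : Nat) : List Char :=
  "The letter a/A appears ".toList ++ PySem.Int.toChars (n : Int) ++ " times".toList
def fmtLongest (ws : List (List Char)) : List Char :=
  "The 5 longest words are ".toList ++ pyReprStrList ws

def text_analyzer (sentence : String) : String × String × String :=
  let count : Nat := sentence.toList.foldl
    (fun n c => if PySem.Chars.isIn [c] ['a', 'A'] then n + 1 else n) 0
  let words := PySem.Chars.split₀ sentence.toList
  let longest := PySem.List.sorted words (fun w => w.length) true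
  let total_words := words.length
  (String.mk (fmtWords total_words),
   String.mk (fmtCount count),
   String.mk (fmtLongest (PySem.List.slice longest (some 0) (some 5))))

-- ===== PORT B =====
-- B's inner while-loop + insert: put w after every kept word at least as long
def insTop (w : List Char) : List (List Char) → List (List Char)
  | [] => [w]
  | y :: ys => if w.length ≤ y.length then y :: insTop w ys else w :: y :: ys

def text_analyzer_alt (sentence : String) : String × String × String :=
  let count : Nat := PySem.Chars.count sentence.toList ['a']
                   + PySem.Chars.count sentence.toList ['A']
  let words := PySem.Chars.split₀ sentence.toList
  let best := words.foldl (fun b w => (insTop w b).take 5) []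
  let total_words := words.length
  (String.mk (fmtWords total_words),
   String.mk (fmtCount count),
   String.mk (fmtLongest best))

-- ===== PRECONDITION & SPEC =====
def Spec_text_analyzer (sentence : String) (out : String × String × String) : Prop := out = text_analyzer_alt sentence
instance (sentence : String) (out : String × String × String) : Decidable (Spec_text_analyzer sentence out) := by unfold Spec_text_analyzer; infer_instance

-- ===== CLAIM (what is proved, stated in full; the proofs are below) =====
def Claim_equal_text_analyzer : Prop := ∀ (sentence : String), Dom_text_analyzer sentence → Spec_text_analyzer sentence (text_analyzer sentence)

-- ===== LEMMAS AND PROOFS =====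

-- counting: A's fold equals count 'a' + count 'A'
lemma isIn_aA (c : Char) : PySem.Chars.isIn [c] ['a', 'A'] = (c = 'a' ∨ c = 'A' : Bool) := by
  by_cases h : c = 'a' ∨ c = 'A'
  · rcases h with h | h <;> subst h <;> decide
  · push_neg at h
    have : PySem.Chars.isIn [c] ['a', 'A'] = false := by
      rw [PySem.Chars.isIn_eq_false_iff]
      intro hin
      have := hin.subset (List.mem_singleton_self c)
      simp at this
      tauto
    simp [this, h.1, h.2]

lemma count_go_singleton (c : Char) (l : List Char) (fuel acc : Nat) (h : l.length ≤ fuel) :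
    PySem.Chars.count.go [c] fuel l acc = acc + l.count c := by
  induction l generalizing fuel acc with
  | nil => cases fuel <;> simp [PySem.Chars.count.go]
  | cons x t ih =>
    cases fuel with
    | zero => simp at h
    | succ m =>
      have hstep : PySem.Chars.count.go [c] (m + 1) (x :: t) acc
          = if c = x then PySem.Chars.count.go [c] m t (acc + 1)
            else PySem.Chars.count.go [c] m t acc := by
        by_cases hx : c = x <;> simp [PySem.Chars.count.go, List.isPrefixOf, hx]
      have hm : t.length ≤ m := by simp at h; omega
      rw [hstep]
      simp only [List.count_cons]
      by_cases hx : c = x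
      · rw [if_pos hx, ih _ _ hm]
        simp [hx]
        omega
      · rw [if_neg hx, ih _ _ hm]
        simp [Ne.symm hx]

lemma count_singleton (c : Char) (l : List Char) :
    PySem.Chars.count l [c] = l.count c := by
  simp [PySem.Chars.count, count_go_singleton]

lemma countA_aux (l : List Char) (acc : Nat) :
    l.foldl (fun n c => if PySem.Chars.isIn [c] ['a', 'A'] then n + 1 else n) acc
      = acc + l.count 'a' + l.count 'A' := by
  induction l generalizing acc with
  | nil => simp
  | cons x t ih =>
    simp only [List.foldl_cons]
    rw [isIn_aA x]
    by_cases h1 : x = 'a' <;> by_cases h2 : x = 'A' <;>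
      simp [h1, h2, ih, List.count_cons] <;> omega

lemma countA_eq (l : List Char) :
    l.foldl (fun n c => if PySem.Chars.isIn [c] ['a', 'A'] then n + 1 else n) 0
      = PySem.Chars.count l ['a'] + PySem.Chars.count l ['A'] := by
  rw [count_singleton, count_singleton, countA_aux]
  omega

-- selection: insTop is A's insertion step
lemma insTop_eq_insertBy (w : List Char) (b : List (List Char)) :
    insTop w b = PySem.List.insertBy (fun a b => decide (b.length < a.length)) w b := by
  induction b with
  | nil => rfl
  | cons y ys ih =>
    show (if w.length ≤ y.length then y :: insTop w ys else w :: y :: ys) = _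
    rw [show PySem.List.insertBy (fun a b => decide (b.length < a.length)) w (y :: ys)
        = if decide (y.length < w.length) then w :: y :: ys
          else y :: PySem.List.insertBy (fun a b => decide (b.length < a.length)) w ys from rfl]
    by_cases hl : w.length ≤ y.length
    · rw [if_pos hl, if_neg (by simpa using Nat.not_lt.mpr hl), ih]
    · rw [if_neg hl, if_pos (by simpa using Nat.lt_of_not_le hl)]

-- truncation commutes with insertion
lemma take_insertBy {α : Type} (p : α → α → Bool) (x : α) (S : List α) (n : Nat) :
    (PySem.List.insertBy p x S).take n = (PySem.List.insertBy p x (S.take n)).take n := by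
  have hstep : ∀ (y : α) (zs : List α), PySem.List.insertBy p x (y :: zs)
      = if p x y then x :: y :: zs else y :: PySem.List.insertBy p x zs := by
    intro y zs; rfl
  induction S generalizing n with
  | nil => simp
  | cons y ys ih =>
    cases n with
    | zero => simp
    | succ m =>
      rw [List.take_succ_cons, hstep y ys, hstep y (ys.take m)]
      by_cases hp : p x y
      · rw [if_pos hp, if_pos hp]
        cases m with
        | zero => simp
        | succ k => simp [List.take_take]
      · rw [if_neg hp, if_neg hp, List.take_succ_cons, List.take_succ_cons, ih]

lemma foldl_take_insertBy {α : Type} (p : α → α → Bool) (l S : List α) :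
    l.foldl (fun b w => (PySem.List.insertBy p w b).take 5) (S.take 5)
      = (l.foldl (fun acc x => PySem.List.insertBy p x acc) S).take 5 := by
  induction l generalizing S with
  | nil => rfl
  | cons w t ih =>
    simp only [List.foldl_cons]
    rw [← take_insertBy, ih]

lemma top5_eq (ws : List (List Char)) :
    ws.foldl (fun b w => (insTop w b).take 5) []
      = (PySem.List.sorted ws (fun w => w.length) true).take 5 := by
  simp only [PySem.List.sorted, insTop_eq_insertBy]
  simpa using foldl_take_insertBy (fun a b => decide (b.length < a.length)) ws []

lemma slice05 {α : Type} (l : List α) :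
    PySem.List.slice l (some 0) (some 5) = l.take 5 := by
  simp only [PySem.List.slice, PySem.List.clampIdx]
  split_ifs <;> simp_all

-- ===== VERDICT (by name: the statement is the Claim_ definition above) =====
theorem text_analyzer_spec : Claim_equal_text_analyzer := by
  intro s _
  unfold Spec_text_analyzer text_analyzer text_analyzer_alt
  simp only [countA_eq, slice05, top5_eq]
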